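-- pv_equiv track=rewrite | github.com/MABeeskow/GebPy | src/gebpy/core/rocks/sedimentary.py | _extract_element_data
-- ===== SOURCE A (Python) =====
-- def _extract_element_data(data_minerals, list_elements):
--     for index, dataset in enumerate(data_minerals):
--         list_keys_i = list(dataset.keys())
--         filtered = [x[len("chemistry."):] for x in list_keys_i if x.startswith("chemistry.")]
--         for element in filtered:
--             if element not in list_elements:
--                 list_elements.append(element)
--
--     return list_elements
-- ===== SOURCE B (Python) =====
-- def _extract_element_data(data_minerals, list_elements):
--     flat = [k[len("chemistry."):] for ds in data_minerals
--             for k in ds if k.startswith("chemistry.")]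
--     # order the genuinely new names by where they first appear in the flat stream
--     list_elements += sorted(set(flat) - set(list_elements), key=flat.index)
--     return list_elements
-- ===== Notes on version B (the rewrite author's own statement) =====
-- stated objective: alternative
-- what changed: B replaces A's nested loops with a per-name membership test and incremental append by a set-difference of all stripped 'chemistry.' names against the existing elements, sorted once by first occurrence in the flattened name stream (key=flat.index) and appended in one step.
import Mathlib
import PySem

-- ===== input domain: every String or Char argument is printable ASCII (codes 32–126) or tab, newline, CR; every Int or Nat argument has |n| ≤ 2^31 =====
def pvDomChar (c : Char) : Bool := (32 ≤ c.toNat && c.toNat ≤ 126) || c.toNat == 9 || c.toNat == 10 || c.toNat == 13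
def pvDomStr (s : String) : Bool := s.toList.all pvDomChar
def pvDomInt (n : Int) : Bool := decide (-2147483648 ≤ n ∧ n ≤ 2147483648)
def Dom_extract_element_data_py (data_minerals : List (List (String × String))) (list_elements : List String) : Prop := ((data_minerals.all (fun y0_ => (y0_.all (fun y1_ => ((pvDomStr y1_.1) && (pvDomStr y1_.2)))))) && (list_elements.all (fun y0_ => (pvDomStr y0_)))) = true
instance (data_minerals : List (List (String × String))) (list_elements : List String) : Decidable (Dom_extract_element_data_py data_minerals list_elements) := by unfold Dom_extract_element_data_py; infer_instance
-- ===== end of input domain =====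

-- B computes the set of genuinely new 'chemistry.' names in one set difference and SORTS it by
-- first occurrence in the flattened name stream, instead of A's nested loops that test and append
-- one name at a time (alternative decomposition). Both Pythons mutate list_elements in place the
-- same way; the equivalence is about the return value.

-- ===== PORT A =====
-- the chemistry-name extraction of one dataset: keys filtered by startswith, prefix stripped
def pvChemNames (dataset : List (String × String)) : List String :=
  ((dataset.map Prod.fst).filter (fun x => PySem.Str.startswith x "chemistry.")).map
    (fun x => PySem.Str.slice x (some (10 : Int)) none)

def extract_element_data_py (data_minerals : List (List (String × String))) (list_elements : List String) : List String :=
  data_minerals.foldl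
    (fun acc dataset =>
      (pvChemNames dataset).foldl
        (fun acc2 element => if element ∈ acc2 then acc2 else acc2 ++ [element]) acc)
    list_elements

-- ===== PORT B =====
def extract_element_data_py_alt (data_minerals : List (List (String × String))) (list_elements : List String) : List String :=
  let flat := data_minerals.flatMap pvChemNames
  -- key=flat.index: every element sorted here occurs in flat, where List.idxOf IS flat.index
  list_elements ++
    PySem.List.sorted (PySem.Set.diff (PySem.Set.ofList flat) (PySem.Set.ofList list_elements))
      (fun e => flat.idxOf e) false

-- ===== PRECONDITION & SPEC =====
def Spec_extract_element_data_py (data_minerals : List (List (String × String))) (list_elements : List String) (out : List String) : Prop := out = extract_element_data_py_alt data_minerals list_elements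
instance (data_minerals : List (List (String × String))) (list_elements : List String) (out : List String) : Decidable (Spec_extract_element_data_py data_minerals list_elements out) := by unfold Spec_extract_element_data_py; infer_instance

-- ===== CLAIM (what is proved, stated in full; the proofs are below) =====
def Claim_equal_extract_element_data_py : Prop := ∀ (data_minerals : List (List (String × String))) (list_elements : List String), Dom_extract_element_data_py data_minerals list_elements → Spec_extract_element_data_py data_minerals list_elements (extract_element_data_py data_minerals list_elements)

-- ===== LEMMAS AND PROOFS =====

-- A's outer fold over datasets is the insert-fold over the flattened name list
theorem pv_foldl_flat (dm : List (List (String × String))) (acc : List String) :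
    extract_element_data_py dm acc =
      (dm.flatMap pvChemNames).foldl
        (fun acc2 element => if element ∈ acc2 then acc2 else acc2 ++ [element]) acc := by
  induction dm generalizing acc with
  | nil => rfl
  | cons d ds ih =>
      simp only [extract_element_data_py, List.foldl_cons, List.flatMap_cons, List.foldl_append]
      exact ih _

-- A's append-if-new step is exactly Set.add
theorem pv_ins_eq_add :
    (fun (acc2 : List String) element => if element ∈ acc2 then acc2 else acc2 ++ [element]) =
      PySem.Set.add := by
  funext s x
  simp [PySem.Set.add]

-- dropping the elements of acc commutes with first dropping copies of an x ∈ acc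
theorem pv_filter_erase (x : String) (acc : List String) (hx : x ∈ acc) (l : List String) :
    l.filter (fun e => ¬ e ∈ acc) = (l.filter (fun e => ¬ e ∈ [x])).filter (fun e => ¬ e ∈ acc) := by
  rw [List.filter_filter]
  congr 1
  funext e
  by_cases he : e = x
  · subst he; simp [hx]
  · simp [he]

-- excluding acc ++ [x] is excluding x first, then acc
theorem pv_filter_append (x : String) (acc l : List String) :
    l.filter (fun e => ¬ e ∈ acc ++ [x]) = (l.filter (fun e => ¬ e ∈ [x])).filter (fun e => ¬ e ∈ acc) := by
  rw [List.filter_filter]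
  congr 1
  funext e
  by_cases he : e = x
  · subst he; simp
  · simp [List.mem_append, he]

-- the Set.add fold appends exactly the first occurrences of the not-yet-present elements
theorem pv_foldl_add (l acc : List String) :
    l.foldl PySem.Set.add acc =
      acc ++ (PySem.Set.ofList l).filter (fun e => ¬ e ∈ acc) := by
  induction l generalizing acc with
  | nil => simp [PySem.Set.ofList]
  | cons x l ih =>
      have hof : PySem.Set.ofList (x :: l) = List.foldl PySem.Set.add (PySem.Set.add [] x) l := rfl
      have hadd0 : PySem.Set.add ([] : List String) x = [x] := by simp [PySem.Set.add]
      rw [List.foldl_cons, ih, hof, hadd0, ih [x]]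
      by_cases hx : x ∈ acc
      · have : PySem.Set.add acc x = acc := by simp [PySem.Set.add, hx]
        rw [this]
        simp only [List.singleton_append, List.filter_cons]
        simp only [hx, not_true_eq_false, decide_false, Bool.false_eq_true, if_false]
        rw [← pv_filter_erase x acc hx]
      · have : PySem.Set.add acc x = acc ++ [x] := by simp [PySem.Set.add, hx]
        rw [this, pv_filter_append]
        simp only [List.singleton_append, List.filter_cons]
        simp only [hx, not_false_eq_true, decide_true, if_true, List.append_assoc,
          List.singleton_append]

-- dedup holds at most the first occurrence of each element, so idxOf is strictly increasing along it
theorem pv_dedup_pairwise (l : List String) :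
    (PySem.List.dedup l).Pairwise (fun a b => l.idxOf a < l.idxOf b) := by
  induction l using List.reverseRecOn with
  | nil => simp [PySem.List.dedup, PySem.Set.ofList]
  | append_singleton l x ih =>
      have hstep : PySem.List.dedup (l ++ [x]) = PySem.Set.add (PySem.List.dedup l) x := by
        simp [PySem.List.dedup, PySem.Set.ofList, List.foldl_append]
      have hmem : ∀ a, a ∈ PySem.List.dedup l → a ∈ l := by
        intro a ha; exact (PySem.List.mem_dedup _ _).mp ha
      have hidx : ∀ a, a ∈ PySem.List.dedup l → (l ++ [x]).idxOf a = l.idxOf a := by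
        intro a ha; exact List.idxOf_append_of_mem (hmem a ha)
      have hlift : (PySem.List.dedup l).Pairwise (fun a b => (l ++ [x]).idxOf a < (l ++ [x]).idxOf b) := by
        refine List.Pairwise.imp_of_mem ?_ ih
        intro a b ha hb h
        rw [hidx a ha, hidx b hb]; exact h
      rw [hstep]
      by_cases hx : x ∈ PySem.List.dedup l
      · have hadd : PySem.Set.add (PySem.List.dedup l) x = PySem.List.dedup l := by
          simp [PySem.Set.add, PySem.Set.contains_eq_listContains, hmem x hx]
        rw [hadd]; exact hlift
      · have hxl : x ∉ l := fun hxl => hx ((PySem.List.mem_dedup _ _).mpr hxl)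
        have hxi : (l ++ [x]).idxOf x = l.length := by
          simp [List.idxOf_append_of_notMem hxl]
        have hadd : PySem.Set.add (PySem.List.dedup l) x = PySem.List.dedup l ++ [x] := by
          simp [PySem.Set.add, PySem.Set.contains_eq_listContains, hxl]
        rw [hadd, List.pairwise_append]
        refine ⟨hlift, by simp, ?_⟩
        intro a ha b hb
        have hb' : b = x := by simpa using hb
        subst hb'
        rw [hidx a ha, hxi]
        exact List.idxOf_lt_length_of_mem (hmem a ha)

-- ===== VERDICT (by name: the statement is the Claim_ definition above) =====
theorem extract_element_data_py_spec : Claim_equal_extract_element_data_py := by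
  intro dm le _
  show extract_element_data_py dm le = extract_element_data_py_alt dm le
  rw [pv_foldl_flat, pv_ins_eq_add, pv_foldl_add]
  simp only [extract_element_data_py_alt]
  congr 1
  have hdiff : PySem.Set.diff (PySem.Set.ofList (dm.flatMap pvChemNames)) (PySem.Set.ofList le) =
      (PySem.Set.ofList (dm.flatMap pvChemNames)).filter (fun e => ¬ e ∈ le) := by
    simp only [PySem.Set.diff]
    apply List.filter_congr
    intro e _
    simp [PySem.Set.contains_eq_listContains, PySem.Set.mem_ofList]
  rw [hdiff]
  refine (PySem.List.sorted_eq_of_perm_of_pairwise_lt _ _ _ (List.Perm.refl _) ?_).symm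
  exact List.Pairwise.filter _ (pv_dedup_pairwise (dm.flatMap pvChemNames))
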